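-- pv_equiv track=rewrite | github.com/odiouschipmunk/visiononlaptop | squash/Functions.py | is_ball_false_pos
-- ===== SOURCE A (Python) =====
-- def is_ball_false_pos(ball_pos, threshold=5):
--     if len(ball_pos) < threshold:
--         return False
--     # assuming the ball_pos array is formatted as [[x1,y1,frame1],[x2,y2,frame2],...]
--     # sort the array by frame number
--     ball_pos.sort(key=lambda x: x[2])
--     # get the last threshold positions
--     thresh_pos = ball_pos[-threshold:]
--     # go through each position and check if the x and y values are the same
--     for i in range(1, threshold):
--         for j in range(0, i):
--             if i == j:
--                 continue
--             if (
--                 thresh_pos[i][0] == thresh_pos[j][0]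
--                 and thresh_pos[i][1] == thresh_pos[j][1]
--             ):
--                 return True
--     return False
-- ===== SOURCE B (Python) =====
-- def is_ball_false_pos(ball_pos, threshold=5):
--     # fewer than two recent positions can never contain a repeated (x, y)
--     if len(ball_pos) < threshold or threshold <= 1:
--         return False
--     # sort the array by frame number (in place, as callers may rely on it)
--     ball_pos.sort(key=lambda x: x[2])
--     # single pass over the last `threshold` positions with a hash set of seen (x, y)
--     seen = set()
--     for pos in ball_pos[-threshold:]:
--         xy = (pos[0], pos[1])
--         if xy in seen:
--             return True
--         seen.add(xy)
--     return False
-- ===== Notes on version B (the rewrite author's own statement) =====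
-- stated objective: idiomatic
-- what changed: The O(threshold^2) nested pairwise index comparison over the last threshold positions is replaced by a single pass that hashes each (x, y) into a set and reports a repeat on first hit; a guard returns False outright for threshold <= 1 (no pair can exist).
import Mathlib
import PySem

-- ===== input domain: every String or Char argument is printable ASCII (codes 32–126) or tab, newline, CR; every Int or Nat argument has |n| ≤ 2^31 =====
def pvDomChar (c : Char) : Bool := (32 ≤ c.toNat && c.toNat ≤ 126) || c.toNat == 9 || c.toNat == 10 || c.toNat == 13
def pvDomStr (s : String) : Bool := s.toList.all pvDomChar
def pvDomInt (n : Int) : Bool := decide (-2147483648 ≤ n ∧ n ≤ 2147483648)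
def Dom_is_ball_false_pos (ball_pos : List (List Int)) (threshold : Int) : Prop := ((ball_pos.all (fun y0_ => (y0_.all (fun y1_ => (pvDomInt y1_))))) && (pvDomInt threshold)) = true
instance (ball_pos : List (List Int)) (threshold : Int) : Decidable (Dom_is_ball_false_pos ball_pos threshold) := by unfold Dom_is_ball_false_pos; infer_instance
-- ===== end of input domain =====

-- B replaces A's nested pairwise comparison of the last `threshold` positions by a single pass
-- with a set of already-seen (x, y) pairs (idiomatic). Equivalence is about the RETURN value:
-- both A and B sort ball_pos in place, except that B returns False before sorting when
-- threshold <= 1 (A sorts first and then finds no pair to compare).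

-- ===== PORT A =====
-- the sort key x[2] and the loop's thresh_pos[i][0]/[1] are ported with pyGetD; exact under
-- Pre_ (all rows of length ≥ 3 whenever the sort is reached, loop indices always in range)
def is_ball_false_pos (ball_pos : List (List Int)) (threshold : Int) : Bool :=
  if (ball_pos.length : Int) < threshold then false
  else
    let sorted := PySem.List.sorted ball_pos (fun x => PySem.List.pyGetD x 2 0)
    let thresh_pos := PySem.List.slice sorted (some (-threshold)) none
    (PySem.List.pyRange 1 threshold 1).any (fun i =>
      (PySem.List.pyRange 0 i 1).any (fun j =>
        if i == j then false
        else
          decide (PySem.List.pyGetD (PySem.List.pyGetD thresh_pos i []) 0 0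
                    = PySem.List.pyGetD (PySem.List.pyGetD thresh_pos j []) 0 0)
          && decide (PySem.List.pyGetD (PySem.List.pyGetD thresh_pos i []) 1 0
                    = PySem.List.pyGetD (PySem.List.pyGetD thresh_pos j []) 1 0)))

-- ===== PORT B =====
-- the for-loop of Source B with its early return; `seen` is a Python set of (x, y) pairs
def pvScan (l : List (List Int)) (seen : PySem.Set (Int × Int)) : Bool :=
  match l with
  | [] => false
  | p :: rest =>
    let xy := (PySem.List.pyGetD p 0 0, PySem.List.pyGetD p 1 0)
    if PySem.Set.contains seen xy then true
    else pvScan rest (PySem.Set.add seen xy)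

def is_ball_false_pos_alt (ball_pos : List (List Int)) (threshold : Int) : Bool :=
  if (ball_pos.length : Int) < threshold ∨ threshold ≤ 1 then false
  else
    let sorted := PySem.List.sorted ball_pos (fun x => PySem.List.pyGetD x 2 0)
    pvScan (PySem.List.slice sorted (some (-threshold)) none) PySem.Set.empty

-- ===== PRECONDITION & SPEC =====
-- Pre_ excludes only inputs on which A raises: len(ball_pos) >= threshold with some row
-- shorter than 3, where A's sort key x[2] raises IndexError.
def Pre_is_ball_false_pos (ball_pos : List (List Int)) (threshold : Int) : Prop :=
  (ball_pos.length : Int) < threshold ∨ ∀ row ∈ ball_pos, 3 ≤ row.length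
instance (ball_pos : List (List Int)) (threshold : Int) : Decidable (Pre_is_ball_false_pos ball_pos threshold) := by unfold Pre_is_ball_false_pos; infer_instance
def pvWitness_is_ball_false_pos : List (List Int) × Int :=
  ([[1, 2, 9], [3, 4, 7], [1, 2, 8]], 3)

def Spec_is_ball_false_pos (ball_pos : List (List Int)) (threshold : Int) (out : Bool) : Prop := out = is_ball_false_pos_alt ball_pos threshold
instance (ball_pos : List (List Int)) (threshold : Int) (out : Bool) : Decidable (Spec_is_ball_false_pos ball_pos threshold out) := by unfold Spec_is_ball_false_pos; infer_instance

-- ===== CLAIM (what is proved, stated in full; the proofs are below) =====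
def Claim_equal_is_ball_false_pos : Prop := ∀ (ball_pos : List (List Int)) (threshold : Int), Dom_is_ball_false_pos ball_pos threshold → Pre_is_ball_false_pos ball_pos threshold → Spec_is_ball_false_pos ball_pos threshold (is_ball_false_pos ball_pos threshold)

-- ===== LEMMAS AND PROOFS =====

-- the (x, y) pair both programs compare
def pvKey (p : List Int) : Int × Int := (PySem.List.pyGetD p 0 0, PySem.List.pyGetD p 1 0)

-- B's scan hits iff some element's key was already seen or the keys are not all distinct
theorem pvScan_iff (l : List (List Int)) (seen : PySem.Set (Int × Int)) :
    pvScan l seen = true ↔ (∃ p ∈ l, pvKey p ∈ seen) ∨ ¬ (l.map pvKey).Nodup := by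
  induction l generalizing seen with
  | nil => simp [pvScan]
  | cons p rest ih =>
    simp only [pvKey] at ih ⊢
    by_cases h : (PySem.List.pyGetD p 0 0, PySem.List.pyGetD p 1 0) ∈ seen
    · have hl : pvScan (p :: rest) seen = true := by
        simp only [pvScan]
        rw [if_pos ((PySem.Set.contains_iff _ _).2 h)]
      rw [hl]
      simp only [true_iff]
      exact Or.inl ⟨p, List.mem_cons_self, h⟩
    · rw [show pvScan (p :: rest) seen = pvScan rest (PySem.Set.add seen (PySem.List.pyGetD p 0 0, PySem.List.pyGetD p 1 0)) from by
        simp only [pvScan]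
        exact if_neg (fun hcon => h ((PySem.Set.contains_iff _ _).1 hcon)), ih]
      simp only [PySem.Set.mem_add, List.map_cons, List.nodup_cons, not_and_or, not_not,
        List.mem_cons, List.mem_map, pvKey]
      constructor
      · rintro (⟨q, hq, hs | he⟩ | hnd)
        · exact Or.inl ⟨q, Or.inr hq, hs⟩
        · exact Or.inr (Or.inl ⟨q, hq, he⟩)
        · exact Or.inr (Or.inr hnd)
      · rintro (⟨q, rfl | hq, hs⟩ | ⟨q, hq, he⟩ | hnd)
        · exact absurd hs h
        · exact Or.inl ⟨q, hq, Or.inl hs⟩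
        · exact Or.inl ⟨q, hq, Or.inr he⟩
        · exact Or.inr hnd


-- A's nested index loops hit iff the keys of l are not all distinct
theorem pvPairs_iff (l : List (List Int)) :
    ((PySem.List.pyRange 1 (l.length : Int) 1).any (fun i =>
      (PySem.List.pyRange 0 i 1).any (fun j =>
        if i == j then false
        else
          decide (PySem.List.pyGetD (PySem.List.pyGetD l i []) 0 0
                    = PySem.List.pyGetD (PySem.List.pyGetD l j []) 0 0)
          && decide (PySem.List.pyGetD (PySem.List.pyGetD l i []) 1 0
                    = PySem.List.pyGetD (PySem.List.pyGetD l j []) 1 0))) = true)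
    ↔ ¬ (l.map pvKey).Nodup := by
  rw [List.any_eq_true]
  constructor
  · rintro ⟨i, hi, hinner⟩
    rw [PySem.List.mem_pyRange_one] at hi
    rw [List.any_eq_true] at hinner
    obtain ⟨j, hj, hcond⟩ := hinner
    rw [PySem.List.mem_pyRange_one] at hj
    rw [if_neg (by simp; omega)] at hcond
    simp only [Bool.and_eq_true, decide_eq_true_eq] at hcond
    rw [PySem.List.pyGetD_eq_getElem l [] (by omega) hi.2,
        PySem.List.pyGetD_eq_getElem l [] (by omega) (by omega)] at hcond
    intro hnd
    have := (List.pairwise_iff_getElem.1 hnd) j.toNat i.toNat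
      (by simp; omega) (by simp; omega) (by omega)
    simp only [List.getElem_map] at this
    exact this (by simp [pvKey, hcond.1, hcond.2])
  · intro hnd
    rw [List.Nodup, List.pairwise_iff_getElem] at hnd
    push Not at hnd
    obtain ⟨a, b, ha, hb, hab, heq⟩ := hnd
    simp only [List.length_map] at ha hb
    simp only [List.getElem_map] at heq
    refine ⟨(b : Int), ?_, ?_⟩
    · rw [PySem.List.mem_pyRange_one]; omega
    · rw [List.any_eq_true]
      refine ⟨(a : Int), by rw [PySem.List.mem_pyRange_one]; omega, ?_⟩
      rw [if_neg (by simp; omega)]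
      simp only [PySem.List.pyGetD_natCast, Bool.and_eq_true, decide_eq_true_eq]
      rw [List.getD_eq_getElem _ _ hb, List.getD_eq_getElem _ _ ha]
      have h1 := congrArg Prod.fst heq
      have h2 := congrArg Prod.snd heq
      simp only [pvKey] at h1 h2
      exact ⟨h1.symm, h2.symm⟩

-- the two ports agree on every input (the totalised pyGetD defaults coincide; the Python
-- programs themselves differ only where A raises, which Pre_ excludes)
theorem pvPortsEq (bp : List (List Int)) (t : Int) :
    is_ball_false_pos bp t = is_ball_false_pos_alt bp t := by
  unfold is_ball_false_pos is_ball_false_pos_alt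
  by_cases hlt : (bp.length : Int) < t
  · rw [if_pos hlt, if_pos (Or.inl hlt)]
  · rw [if_neg hlt]
    by_cases ht1 : t ≤ 1
    · rw [if_pos (Or.inr ht1)]
      simp only [PySem.List.pyRange_one_eq_nil ht1, List.any_nil]
    · rw [if_neg (by push Not; omega)]
      simp only []
      obtain ⟨k, rfl⟩ : ∃ k : Nat, t = (k : Int) := ⟨t.toNat, by omega⟩
      set srt := PySem.List.sorted bp (fun x => PySem.List.pyGetD x 2 0) with hsrt
      have hsl : srt.length = bp.length := by
        rw [hsrt]; exact PySem.List.length_sorted ..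
      have hthresh : PySem.List.slice srt (some (-(k : Int))) none = srt.drop (srt.length - k) := by
        exact PySem.List.slice_from_neg_natCast srt k (by omega)
      rw [hthresh]
      have hlen2 : (((srt.drop (srt.length - k)).length : Nat) : Int) = (k : Int) := by
        rw [List.length_drop]; omega
      rw [← hlen2, Bool.eq_iff_iff, pvPairs_iff, pvScan_iff]
      simp [PySem.Set.empty]

-- ===== VERDICT (by name: the statement is the Claim_ definition above) =====
theorem is_ball_false_pos_spec : Claim_equal_is_ball_false_pos := by
  intro bp t _ _
  unfold Spec_is_ball_false_pos
  exact pvPortsEq bp t
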